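-- pv_equiv track=rewrite | github.com/UltimaRatio-Regum/voxlibris | backend/text_parser.py | _infer_turn_taking
-- ===== SOURCE A (Python) =====
-- from typing import Optional
--
-- def _infer_turn_taking(speaker_history: list[str]) -> Optional[str]:
--     if len(speaker_history) < 2:
--         return None
--
--     last = speaker_history[-1]
--     unique_recent = []
--     for sp in reversed(speaker_history):
--         if sp not in unique_recent:
--             unique_recent.append(sp)
--         if len(unique_recent) >= 2:
--             break
--
--     if len(unique_recent) >= 2:
--         return unique_recent[1] if unique_recent[0] == last else unique_recent[0]
--
--     return None
-- ===== SOURCE B (Python) =====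
-- from typing import Optional
--
-- def _infer_turn_taking(speaker_history: list[str]) -> Optional[str]:
--     if len(speaker_history) < 2:
--         return None
--     last = speaker_history[-1]
--     result = None
--     for sp in speaker_history[:-1]:
--         if sp != last:
--             result = sp
--     return result
-- ===== Notes on version B (the rewrite author's own statement) =====
-- stated objective: simpler
-- what changed: Replaces the backward scan that builds a distinct-speaker list with a single forward pass over speaker_history[:-1] keeping a running 'most recent speaker different from last' accumulator.
import Mathlib
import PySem

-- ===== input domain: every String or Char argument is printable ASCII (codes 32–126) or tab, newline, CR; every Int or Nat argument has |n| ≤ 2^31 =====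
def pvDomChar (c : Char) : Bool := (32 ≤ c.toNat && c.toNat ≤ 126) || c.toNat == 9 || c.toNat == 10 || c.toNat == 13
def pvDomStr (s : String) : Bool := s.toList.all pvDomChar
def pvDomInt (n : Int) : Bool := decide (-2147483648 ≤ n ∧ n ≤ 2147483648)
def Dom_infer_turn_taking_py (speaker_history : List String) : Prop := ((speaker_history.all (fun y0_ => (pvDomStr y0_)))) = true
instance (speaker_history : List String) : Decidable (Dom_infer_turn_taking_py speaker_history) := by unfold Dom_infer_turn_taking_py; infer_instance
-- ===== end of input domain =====

-- B replaces A's backward scan building a distinct-speaker list with one forward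
-- pass over speaker_history[:-1] keeping a running "most recent speaker ≠ last"
-- accumulator (objective: simpler).

-- ===== PORT A =====
-- the `for sp in reversed(speaker_history): ...` loop with its break condition
def pvLoopA (l : List String) (acc : List String) : List String :=
  match l with
  | [] => acc
  | sp :: rest =>
    let acc' := if sp ∈ acc then acc else acc ++ [sp]
    if 2 ≤ acc'.length then acc' else pvLoopA rest acc'

def infer_turn_taking_py (speaker_history : List String) : Option String :=
  if speaker_history.length < 2 then none
  else
    match PySem.List.pyGet? speaker_history (-1) with
    | none => none  -- unreachable: length ≥ 2
    | some last =>
      let unique_recent := pvLoopA speaker_history.reverse []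
      if 2 ≤ unique_recent.length then
        if unique_recent[0]? = some last then unique_recent[1]? else unique_recent[0]?
      else none

-- ===== PORT B =====
def infer_turn_taking_py_alt (speaker_history : List String) : Option String :=
  if speaker_history.length < 2 then none
  else
    match PySem.List.pyGet? speaker_history (-1) with
    | none => none  -- unreachable: length ≥ 2
    | some last =>
      (PySem.List.slice speaker_history none (some (-1))).foldl
        (fun result sp => if sp ≠ last then some sp else result) none

-- ===== PRECONDITION & SPEC =====
def Spec_infer_turn_taking_py (speaker_history : List String) (out : Option String) : Prop := out = infer_turn_taking_py_alt speaker_history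
instance (speaker_history : List String) (out : Option String) : Decidable (Spec_infer_turn_taking_py speaker_history out) := by unfold Spec_infer_turn_taking_py; infer_instance

-- ===== CLAIM (what is proved, stated in full; the proofs are below) =====
def Claim_equal_infer_turn_taking_py : Prop := ∀ (speaker_history : List String), Dom_infer_turn_taking_py speaker_history → Spec_infer_turn_taking_py speaker_history (infer_turn_taking_py speaker_history)

-- ===== LEMMAS AND PROOFS =====

-- A's loop, once `last` has been inserted, returns [last, x] for the first
-- element x of the remaining (reversed) list differing from last, else [last].
theorem pvLoopA_eq (l : List String) (last : String) :
    pvLoopA l [last] = match l.find? (fun sp => sp != last) with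
      | some x => [last, x]
      | none => [last] := by
  induction l with
  | nil => simp [pvLoopA]
  | cons sp rest ih =>
    by_cases hsp : sp = last
    · subst hsp
      simpa [pvLoopA, List.find?] using ih
    · have hb : (sp != last) = true := by simp [hsp]
      simp [pvLoopA, List.find?, hsp, hb]

-- B's fold computes the most recent element ≠ last, i.e. the first such
-- element of the reverse.
theorem pvFoldB_eq (ys : List String) (last : String) (init : Option String) :
    ys.foldl (fun result sp => if sp ≠ last then some sp else result) init =
    match ys.reverse.find? (fun sp => sp != last) with
      | some x => some x
      | none => init := by
  induction ys generalizing init with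
  | nil => simp
  | cons sp rest ih =>
    simp only [List.foldl_cons, ih, List.reverse_cons, List.find?_append]
    by_cases hsp : sp = last
    · have hb : (sp != last) = false := by simp [hsp]
      cases hf : rest.reverse.find? (fun x => x != last) <;>
        simp [List.find?, hf, Option.or, hsp]
    · have hb : (sp != last) = true := by simp [hsp]
      cases hf : rest.reverse.find? (fun x => x != last) <;>
        simp [List.find?, hb, hf, Option.or, hsp]

-- ===== VERDICT (by name: the statement is the Claim_ definition above) =====
theorem infer_turn_taking_py_spec : Claim_equal_infer_turn_taking_py := by
  unfold Claim_equal_infer_turn_taking_py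
  intro speaker_history _
  unfold Spec_infer_turn_taking_py
  induction speaker_history using List.reverseRecOn with
  | nil => simp [infer_turn_taking_py, infer_turn_taking_py_alt]
  | append_singleton ys a _ =>
    by_cases hys : ys = []
    · subst hys; simp [infer_turn_taking_py, infer_turn_taking_py_alt]
    · have hlen : ¬ (ys ++ [a]).length < 2 := by
        have := List.length_pos_iff.mpr hys
        simp [List.length_append]; omega
      simp only [infer_turn_taking_py, infer_turn_taking_py_alt, hlen, if_false,
        PySem.List.pyGet?_neg_one_append_singleton, PySem.List.slice_to_neg_one,
        List.dropLast_concat, List.reverse_append, List.reverse_cons,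
        List.reverse_nil, List.nil_append, List.cons_append]
      have hstep : pvLoopA (a :: ys.reverse) [] = pvLoopA ys.reverse [a] := by
        simp [pvLoopA]
      rw [hstep, pvLoopA_eq, pvFoldB_eq]
      cases h : ys.reverse.find? (fun sp => sp != a) with
      | none => simp
      | some x =>
        simp
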